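-- pv_equiv track=rewrite | github.com/Tfloow/Connect4 | ai_student.py | getBit
-- ===== SOURCE A (Python) =====
-- def getBit(placePiece):
--   """
--   :param placePiece: liste de mes pièces
--   :return: un dictionnaire avec les ensembles de lignes
--   """
--   bit = {}
--   sized = [1,2,3,4]
--   biggestSol = []
--   sizeMax = 0
--
--
--   if len(placePiece) == 0:
--     return None
--
--
--   for indexing in placePiece:
--     for i in range(-1,2):
--       for j in range(-1,2):
--         if i == 0 and j == 0:
--           continue
--         else:
--           if (indexing[0]+i, indexing[1]+j) in placePiece:
--               # 3 d'affilé
--               if (indexing[0] + 2*i, indexing[1] + 2*j) in placePiece: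
--                 if (indexing[0] + 3*i, indexing[1] + 3*j) in placePiece:
--                   if 4 in sized:
--                     sized.pop(sized.index(4))
--                     bit[4] = []
--                     bit[4].append([(indexing[0], indexing[1]), (indexing[0] + i, indexing[1] + j),
--                                  (indexing[0] + 2 * i, indexing[1] + 2 * j),(indexing[0] + 3 * i, indexing[1] + 3 * j)])
--                   else:
--                     bit[4].append([(indexing[0], indexing[1]), (indexing[0] + i, indexing[1] + j),
--                                    (indexing[0] + 2 * i, indexing[1] + 2 * j),
--                                    (indexing[0] + 3 * i, indexing[1] + 3 * j)])
--
--                 if 3 in sized: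
--                   sized.pop(sized.index(3))
--                   bit[3] = []
--                   bit[3].append([(indexing[0], indexing[1]),(indexing[0]+i, indexing[1]+j),(indexing[0]+2*i, indexing[1]+2*j)])
--                 else:
--                   bit[3].append([(indexing[0], indexing[1]),(indexing[0]+i, indexing[1]+j),(indexing[0]+2*i, indexing[1]+2*j)])
--               # 2 d'affilé en diag
--               else:
--                 if 2 in sized:
--                   sized.pop(sized.index(2))
--                   bit[2] = []
--                   bit[2].append([(indexing[0], indexing[1]),(indexing[0]+i, indexing[1]+j)])
--                 else:
--                   bit[2].append([(indexing[0], indexing[1]),(indexing[0]+i, indexing[1]+j)])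
--   return bit
-- ===== SOURCE B (Python) =====
-- def getBit(placePiece):
--   """
--   :param placePiece: liste de mes pièces
--   :return: un dictionnaire avec les ensembles de lignes
--   """
--   if not placePiece:
--     return None
--   present = set(placePiece)
--   dirs = [(-1, -1), (-1, 0), (-1, 1), (0, -1), (0, 1), (1, -1), (1, 0), (1, 1)]
--   # Stage 1: per direction, a dynamic program over the pieces sorted by decreasing
--   # projection on the direction, so the successor's run length is already known:
--   # run[(p, d)] = 0 if p+d is absent, else 1 + min(2, run[(p+d, d)]).
--   run = {}
--   for d in dirs:
--     i, j = d
--     for p in sorted(placePiece, key=lambda q: -(q[0] * i + q[1] * j)):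
--       nxt = (p[0] + i, p[1] + j)
--       run[(p, d)] = 1 + min(2, run.get((nxt, d), 0)) if nxt in present else 0
--   # Stage 2: emit the lines in the original traversal order, dispatching on run length.
--   bit = {}
--   for p in placePiece:
--     x, y = p
--     for d in dirs:
--       i, j = d
--       r = run[(p, d)]
--       if r == 1:
--         bit.setdefault(2, []).append([p, (x + i, y + j)])
--       elif r == 2:
--         bit.setdefault(3, []).append([p, (x + i, y + j), (x + 2 * i, y + 2 * j)])
--       elif r == 3:
--         bit.setdefault(4, []).append([p, (x + i, y + j), (x + 2 * i, y + 2 * j), (x + 3 * i, y + 3 * j)])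
--         bit.setdefault(3, []).append([p, (x + i, y + j), (x + 2 * i, y + 2 * j)])
--   return bit
-- ===== Notes on version B (the rewrite author's own statement) =====
-- stated objective: faster
-- what changed: B is two staged passes: first a per-direction dynamic program over the pieces sorted by decreasing projection on the direction (run[p,d] = 0 if p+d absent else 1+min(2, run[p+d,d]), each cell computed once from its successor), then a separate emission pass that dispatches on the memoised run length with setdefault; A instead probes list membership of p+d, p+2d, p+3d with nested ifs and pop/index bookkeeping on 'sized'.
import Mathlib
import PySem

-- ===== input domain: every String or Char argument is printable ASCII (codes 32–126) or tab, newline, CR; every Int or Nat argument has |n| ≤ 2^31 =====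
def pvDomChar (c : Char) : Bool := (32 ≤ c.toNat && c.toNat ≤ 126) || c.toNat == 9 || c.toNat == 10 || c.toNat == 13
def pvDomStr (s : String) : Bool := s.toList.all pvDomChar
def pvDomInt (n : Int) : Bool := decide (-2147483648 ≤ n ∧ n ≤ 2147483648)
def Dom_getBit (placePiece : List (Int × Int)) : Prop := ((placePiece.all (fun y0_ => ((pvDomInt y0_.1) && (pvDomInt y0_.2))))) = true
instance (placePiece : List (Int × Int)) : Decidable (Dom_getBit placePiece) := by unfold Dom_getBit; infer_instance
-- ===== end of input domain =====

-- B: two staged passes — a per-direction run-length dynamic program over the pieces sorted by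
-- decreasing projection (each run value computed once from its successor), then an emission pass
-- dispatching on the memoised run length — replacing A's nested membership probes and the
-- 'sized' pop/index bookkeeping; equal output (including dict key order).


-- ===== PORT A =====
-- sized.pop(sized.index(v)) — both steps succeed in A because they are guarded by `v in sized`,
-- so the fallback arms are unreachable and this is exact.
def pvPopIndex (xs : List Int) (v : Int) : List Int :=
  match PySem.List.index? xs v with
  | some ix =>
    match PySem.List.pop? xs (ix : Int) with
    | some pr => pr.2
    | none => xs
  | none => xs

-- the j-loop body of A (named so the proofs can speak about one step)
def pvBodyA (placePiece : List (Int × Int)) (indexing : Int × Int)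
    (st : PySem.Dict Int (List (List (Int × Int))) × List Int) (d : Int × Int) :
    PySem.Dict Int (List (List (Int × Int))) × List Int :=
  if d.1 == 0 && d.2 == 0 then
    st
  else
    if placePiece.contains (indexing.1 + d.1, indexing.2 + d.2) then
      if placePiece.contains (indexing.1 + 2*d.1, indexing.2 + 2*d.2) then
        let st1 :=
          if placePiece.contains (indexing.1 + 3*d.1, indexing.2 + 3*d.2) then
            if st.2.contains 4 then
              (st.1.insert 4 [[(indexing.1, indexing.2), (indexing.1 + d.1, indexing.2 + d.2),
                               (indexing.1 + 2*d.1, indexing.2 + 2*d.2), (indexing.1 + 3*d.1, indexing.2 + 3*d.2)]],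
               pvPopIndex st.2 4)
            else
              (st.1.modify 4 [] (· ++ [[(indexing.1, indexing.2), (indexing.1 + d.1, indexing.2 + d.2),
                                        (indexing.1 + 2*d.1, indexing.2 + 2*d.2), (indexing.1 + 3*d.1, indexing.2 + 3*d.2)]]),
               st.2)
          else (st.1, st.2)
        if st1.2.contains 3 then
          (st1.1.insert 3 [[(indexing.1, indexing.2), (indexing.1 + d.1, indexing.2 + d.2),
                            (indexing.1 + 2*d.1, indexing.2 + 2*d.2)]],
           pvPopIndex st1.2 3)
        else
          (st1.1.modify 3 [] (· ++ [[(indexing.1, indexing.2), (indexing.1 + d.1, indexing.2 + d.2),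
                                     (indexing.1 + 2*d.1, indexing.2 + 2*d.2)]]),
           st1.2)
      else
        if st.2.contains 2 then
          (st.1.insert 2 [[(indexing.1, indexing.2), (indexing.1 + d.1, indexing.2 + d.2)]],
           pvPopIndex st.2 2)
        else
          (st.1.modify 2 [] (· ++ [[(indexing.1, indexing.2), (indexing.1 + d.1, indexing.2 + d.2)]]),
           st.2)
    else st

-- literal port of A; `biggestSol`/`sizeMax` are dead locals and dropped; `bit[k].append(…)` on the
-- `k not in sized` branches is `modify k [] (· ++ [line])`: exact because A only reaches them after
-- `k` was removed from `sized`, which happens together with `bit[k] = []`, so the key exists.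
def getBit (placePiece : List (Int × Int)) : Option (List (Int × List (List (Int × Int)))) :=
  if placePiece.length == 0 then
    none
  else
    let st :=
      placePiece.foldl (fun st indexing =>
        (PySem.List.pyRange (-1) 2 1).foldl (fun st i =>
          (PySem.List.pyRange (-1) 2 1).foldl (fun st j =>
            pvBodyA placePiece indexing st (i, j))
            st)
          st)
        ((PySem.Dict.empty : PySem.Dict Int (List (List (Int × Int)))), [1, 2, 3, 4])
    some st.1.items

-- ===== PORT B =====
def pvDirs : List (Int × Int) := [(-1,-1),(-1,0),(-1,1),(0,-1),(0,1),(1,-1),(1,0),(1,1)]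

-- the sort key's projection: q[0]*i + q[1]*j
def pvProj (d q : Int × Int) : Int := q.1 * d.1 + q.2 * d.2

-- stage-1 loop body: run[(p, d)] = 1 + min(2, run.get((nxt, d), 0)) if nxt in present else 0
def pvDP (present : PySem.Set (Int × Int)) (d : Int × Int)
    (run : PySem.Dict ((Int × Int) × (Int × Int)) Int) (p : Int × Int) :
    PySem.Dict ((Int × Int) × (Int × Int)) Int :=
  let nxt := (p.1 + d.1, p.2 + d.2)
  if PySem.Set.contains present nxt then
    run.insert (p, d) (1 + min 2 (run.getD (nxt, d) 0))
  else
    run.insert (p, d) 0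

-- one direction of stage 1: the fold over sorted(placePiece, key=lambda q: -(q[0]*i+q[1]*j))
def pvDirFold (pp : List (Int × Int)) (present : PySem.Set (Int × Int))
    (run : PySem.Dict ((Int × Int) × (Int × Int)) Int) (d : Int × Int) :
    PySem.Dict ((Int × Int) × (Int × Int)) Int :=
  (PySem.List.sorted pp (fun q => -(pvProj d q)) false).foldl (pvDP present d) run

-- bit.setdefault(k, []).append(line)
def pvPush (bit : PySem.Dict Int (List (List (Int × Int)))) (k : Int) (line : List (Int × Int)) :
    PySem.Dict Int (List (List (Int × Int))) :=
  (bit.setdefault k []).modify k [] (· ++ [line])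

-- the stage-2 direction-loop body; `run[(p, d)]` is ported as getD with default 0: the key is
-- always present (every p ∈ placePiece was written in stage 1), so the default is unreachable.
def pvBodyB (run : PySem.Dict ((Int × Int) × (Int × Int)) Int) (p : Int × Int)
    (bit : PySem.Dict Int (List (List (Int × Int)))) (d : Int × Int) :
    PySem.Dict Int (List (List (Int × Int))) :=
  let r := run.getD (p, d) 0
  if r == 1 then
    pvPush bit 2 [(p.1, p.2), (p.1 + d.1, p.2 + d.2)]
  else if r == 2 then
    pvPush bit 3 [(p.1, p.2), (p.1 + d.1, p.2 + d.2), (p.1 + 2*d.1, p.2 + 2*d.2)]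
  else if r == 3 then
    pvPush (pvPush bit 4 [(p.1, p.2), (p.1 + d.1, p.2 + d.2), (p.1 + 2*d.1, p.2 + 2*d.2),
                          (p.1 + 3*d.1, p.2 + 3*d.2)])
           3 [(p.1, p.2), (p.1 + d.1, p.2 + d.2), (p.1 + 2*d.1, p.2 + 2*d.2)]
  else bit

def getBit_alt (placePiece : List (Int × Int)) : Option (List (Int × List (List (Int × Int)))) :=
  if placePiece.isEmpty then
    none
  else
    let present := PySem.Set.ofList placePiece
    let run := pvDirs.foldl (pvDirFold placePiece present)
      (PySem.Dict.empty : PySem.Dict ((Int × Int) × (Int × Int)) Int)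
    let bit :=
      placePiece.foldl (fun bit p => pvDirs.foldl (pvBodyB run p) bit)
        (PySem.Dict.empty : PySem.Dict Int (List (List (Int × Int))))
    some bit.items

-- ===== PRECONDITION & SPEC =====
def Spec_getBit (placePiece : List (Int × Int)) (out : Option (List (Int × List (List (Int × Int))))) : Prop := out = getBit_alt placePiece
instance (placePiece : List (Int × Int)) (out : Option (List (Int × List (List (Int × Int))))) : Decidable (Spec_getBit placePiece out) := by unfold Spec_getBit; infer_instance

-- ===== CLAIM (what is proved, stated in full; the proofs are below) =====
def Claim_equal_getBit : Prop := ∀ (placePiece : List (Int × Int)), Dom_getBit placePiece → Spec_getBit placePiece (getBit placePiece)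

-- ===== LEMMAS AND PROOFS =====

-- the run length A's three nested membership probes determine for (p, d)
def pvSpecR (pp : List (Int × Int)) (p d : Int × Int) : Int :=
  if pp.contains (p.1 + d.1, p.2 + d.2) then
    if pp.contains (p.1 + 2*d.1, p.2 + 2*d.2) then
      if pp.contains (p.1 + 3*d.1, p.2 + 3*d.2) then 3 else 2
    else 1
  else 0

-- the DP recurrence matches the membership formula
lemma pvSpecR_rec (pp : List (Int × Int)) (p d : Int × Int)
    (h : pp.contains (p.1 + d.1, p.2 + d.2) = true) :
    pvSpecR pp p d = 1 + min 2 (pvSpecR pp (p.1 + d.1, p.2 + d.2) d) := by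
  have e2 : (p.1 + d.1 + d.1, p.2 + d.2 + d.2) = (p.1 + 2*d.1, p.2 + 2*d.2) := by
    simp only [Prod.mk.injEq]; exact ⟨by ring, by ring⟩
  have e3 : (p.1 + d.1 + 2*d.1, p.2 + d.2 + 2*d.2) = (p.1 + 3*d.1, p.2 + 3*d.2) := by
    simp only [Prod.mk.injEq]; exact ⟨by ring, by ring⟩
  unfold pvSpecR
  rw [h]
  simp only [e2, e3]
  split_ifs <;> norm_num

lemma pvMemSet (xs : List (Int × Int)) (q : Int × Int) :
    PySem.Set.contains (PySem.Set.ofList xs) q = xs.contains q := by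
  simp [pysem]

-- the projection moves strictly forward along a direction with pvProj d d > 0
lemma pvProj_next (d p : Int × Int) :
    pvProj d (p.1 + d.1, p.2 + d.2) = pvProj d p + pvProj d d := by
  unfold pvProj; ring

-- stage-1 single-direction correctness: folding pvDP over a list sorted by decreasing
-- projection leaves every key (q, d), q ∈ pp, at the membership-formula run length
lemma pvDPfold (pp : List (Int × Int)) (d : Int × Int) (hd : 0 < pvProj d d) :
    ∀ (l : List (Int × Int)) (m : PySem.Dict ((Int × Int) × (Int × Int)) Int),
      List.Pairwise (fun a b => -(pvProj d a) ≤ -(pvProj d b)) l →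
      (∀ e ∈ l, e ∈ pp) →
      (∀ q, q ∈ pp → q ∉ l → m.get? (q, d) = some (pvSpecR pp q d)) →
      ∀ q, q ∈ pp → (l.foldl (pvDP (PySem.Set.ofList pp) d) m).get? (q, d) = some (pvSpecR pp q d) := by
  intro l
  induction l with
  | nil => intro m _ _ hI q hq; exact hI q hq (by simp)
  | cons p l' ih =>
    intro m hpw hmem hI q hq
    simp only [List.foldl_cons]
    apply ih (pvDP (PySem.Set.ofList pp) d m p) hpw.of_cons (fun e he => hmem e (by simp [he]))
      _ q hq
    intro q' hq' hnl'
    rcases List.pairwise_cons.mp hpw with ⟨hhead, _⟩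
    by_cases hqp : q' = p
    · subst hqp
      simp only [pvDP]
      by_cases hin : (q'.1 + d.1, q'.2 + d.2) ∈ pp
      · have hc : PySem.Set.contains (PySem.Set.ofList pp) (q'.1 + d.1, q'.2 + d.2) = true := by
          rw [pvMemSet]; simp [hin]
        rw [hc]
        simp only [if_true]
        rw [PySem.Dict.get?_insert_self]
        have hn1 : (q'.1 + d.1, q'.2 + d.2) ≠ q' := by
          intro h
          have := pvProj_next d q'
          rw [h] at this
          omega
        have hn2 : (q'.1 + d.1, q'.2 + d.2) ∉ l' := by
          intro h
          have h1 := hhead _ h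
          have h2 := pvProj_next d q'
          omega
        have hget := hI (q'.1 + d.1, q'.2 + d.2) hin (by simp [hn1, hn2])
        rw [PySem.Dict.getD_of_get?_eq_some m 0 hget]
        rw [pvSpecR_rec pp q' d (by simp [hin])]
      · have hc : PySem.Set.contains (PySem.Set.ofList pp) (q'.1 + d.1, q'.2 + d.2) = false := by
          rw [pvMemSet]; simp [hin]
        rw [hc]
        simp only [Bool.false_eq_true, if_false]
        rw [PySem.Dict.get?_insert_self]
        unfold pvSpecR
        simp [hin]
    · have hne : ((q', d) : (Int × Int) × (Int × Int)) ≠ (p, d) := by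
        simp [Prod.ext_iff, hqp]
      simp only [pvDP]
      split <;> rw [PySem.Dict.get?_insert_of_ne _ _ hne] <;>
        exact hI q' hq' (by simp [hqp, hnl'])

-- folding a direction d leaves every key with a different direction untouched
lemma pvDP_preserve (present : PySem.Set (Int × Int)) (d : Int × Int) :
    ∀ (l : List (Int × Int)) (m : PySem.Dict ((Int × Int) × (Int × Int)) Int)
      (q : Int × Int) (d' : Int × Int), d' ≠ d →
      (l.foldl (pvDP present d) m).get? (q, d') = m.get? (q, d') := by
  intro l
  induction l with
  | nil => intro m q d' _; rfl
  | cons p l' ih =>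
    intro m q d' hne
    simp only [List.foldl_cons]
    rw [ih _ q d' hne]
    have hk : ((q, d') : (Int × Int) × (Int × Int)) ≠ (p, d) := by
      simp [Prod.ext_iff, hne]
    simp only [pvDP]
    split <;> rw [PySem.Dict.get?_insert_of_ne _ _ hk]

lemma pvDirFold_preserve (pp : List (Int × Int)) (present : PySem.Set (Int × Int))
    (m : PySem.Dict ((Int × Int) × (Int × Int)) Int) (d q : Int × Int) (d' : Int × Int)
    (h : d' ≠ d) : (pvDirFold pp present m d).get? (q, d') = m.get? (q, d') :=
  pvDP_preserve present d _ m q d' h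

lemma pvDirsFold_preserve (pp : List (Int × Int)) :
    ∀ (ds : List (Int × Int)) (m : PySem.Dict ((Int × Int) × (Int × Int)) Int)
      (q d : Int × Int), d ∉ ds →
      (ds.foldl (pvDirFold pp (PySem.Set.ofList pp)) m).get? (q, d) = m.get? (q, d) := by
  intro ds
  induction ds with
  | nil => intro m q d _; rfl
  | cons e ds' ih =>
    intro m q d hd
    simp only [List.foldl_cons]
    rw [ih _ q d (by simp_all), pvDirFold_preserve pp _ m e q d (by simp_all)]

-- stage-1 full correctness over a duplicate-free direction list
lemma pvStage1_get (pp : List (Int × Int)) :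
    ∀ (ds : List (Int × Int)) (m : PySem.Dict ((Int × Int) × (Int × Int)) Int),
      ds.Nodup → (∀ e ∈ ds, 0 < pvProj e e) →
      ∀ d ∈ ds, ∀ q ∈ pp,
        (ds.foldl (pvDirFold pp (PySem.Set.ofList pp)) m).get? (q, d) = some (pvSpecR pp q d) := by
  intro ds
  induction ds with
  | nil => intro m _ _ d hd; exact absurd hd (by simp)
  | cons e ds' ih =>
    intro m hnd hpos d hd q hq
    simp only [List.foldl_cons]
    rcases List.mem_cons.mp hd with he | hds'
    · subst he
      rw [pvDirsFold_preserve pp ds' _ q d (by simp_all [List.nodup_cons])]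
      exact pvDPfold pp d (hpos d (by simp)) _ m
        (PySem.List.sorted_pairwise pp (fun q => -(pvProj d q)))
        (fun e he => ((PySem.List.mem_sorted pp _ false e).mp he))
        (fun q' hq' hn => absurd ((PySem.List.mem_sorted pp _ false q').mpr hq') hn) q hq
    · exact ih _ (List.nodup_cons.mp hnd).2 (fun e' he' => hpos e' (by simp [he'])) d hds' q hq

-- ===== A-SIDE MACHINERY (invariant: `sized` is exactly the keys not yet in `bit`) =====
def pvSz (b : PySem.Dict Int (List (List (Int × Int)))) : List Int :=
  [1, 2, 3, 4].filter (fun k => !(b.contains k))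

def pvGood (b : PySem.Dict Int (List (List (Int × Int)))) : Prop := b.contains 1 = false

def pvDirs9 : List (Int × Int) := [(-1,-1),(-1,0),(-1,1),(0,-1),(0,0),(0,1),(1,-1),(1,0),(1,1)]

lemma pvInner_eq (pp : List (Int × Int)) (p : Int × Int)
    (st : PySem.Dict Int (List (List (Int × Int))) × List Int) :
    (PySem.List.pyRange (-1) 2 1).foldl (fun st i =>
      (PySem.List.pyRange (-1) 2 1).foldl (fun st j =>
        pvBodyA pp p st (i, j)) st) st
    = pvDirs9.foldl (pvBodyA pp p) st := by
  simp only [show PySem.List.pyRange (-1) 2 1 = [-1,0,1] from rfl, pvDirs9,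
    List.foldl_cons, List.foldl_nil]

lemma pvA_unfold (placePiece : List (Int × Int)) :
    getBit placePiece =
      if placePiece.length == 0 then none
      else some ((placePiece.foldl (fun st p => pvDirs9.foldl (pvBodyA placePiece p) st)
        ((PySem.Dict.empty : PySem.Dict Int (List (List (Int × Int)))), [1, 2, 3, 4])).1.items) := by
  unfold getBit
  simp only [pvInner_eq]

lemma pvModify_eq_insert (b : PySem.Dict Int (List (List (Int × Int)))) (k : Int)
    (f : List (List (Int × Int)) → List (List (Int × Int))) :
    b.modify k [] f = b.insert k (f (b.getD k [])) := rfl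

lemma pvP44 : pvPopIndex [1,2,3,4] 4 = [1,2,3] := by decide
lemma pvP44a : pvPopIndex [1,2,4] 4 = [1,2] := by decide
lemma pvP44b : pvPopIndex [1,3,4] 4 = [1,3] := by decide
lemma pvP44c : pvPopIndex [1,4] 4 = [1] := by decide
lemma pvP33 : pvPopIndex [1,2,3] 3 = [1,2] := by decide
lemma pvP33a : pvPopIndex [1,3] 3 = [1] := by decide
lemma pvP33b : pvPopIndex [1,2,3,4] 3 = [1,2,4] := by decide
lemma pvP33c : pvPopIndex [1,3,4] 3 = [1,4] := by decide
lemma pvP22 : pvPopIndex [1,2] 2 = [1] := by decide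
lemma pvP22a : pvPopIndex [1,2,3] 2 = [1,3] := by decide
lemma pvP22b : pvPopIndex [1,2,4] 2 = [1,4] := by decide
lemma pvP22c : pvPopIndex [1,2,3,4] 2 = [1,3,4] := by decide

-- one direction step: A's nested probes = B's dispatch on the memoised run length
lemma pvStep_eq (pp : List (Int × Int)) (run : PySem.Dict ((Int × Int) × (Int × Int)) Int)
    (p d : Int × Int) (b : PySem.Dict Int (List (List (Int × Int))))
    (h0 : (d.1 == 0 && d.2 == 0) = false) (hr : run.getD (p, d) 0 = pvSpecR pp p d)
    (hg : pvGood b) :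
    pvBodyA pp p (b, pvSz b) d = (pvBodyB run p b d, pvSz (pvBodyB run p b d)) ∧
      pvGood (pvBodyB run p b d) := by
  unfold pvBodyA pvBodyB pvGood at *
  rw [h0, hr]
  by_cases m1 : (p.1 + d.1, p.2 + d.2) ∈ pp
  · by_cases m2 : (p.1 + 2*d.1, p.2 + 2*d.2) ∈ pp
    · by_cases m3 : (p.1 + 3*d.1, p.2 + 3*d.2) ∈ pp
      all_goals (
        by_cases h2 : b.contains 2 = true <;> by_cases h3 : b.contains 3 = true <;>
          by_cases h4 : b.contains 4 = true <;>
          simp [pvSpecR, m1, m2, m3, h2, h3, h4, hg, pvSz, pvPush,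
                pvP44, pvP44a, pvP44b, pvP44c, pvP33, pvP33a, pvP33b, pvP33c,
                pvModify_eq_insert, PySem.Dict.setdefault_of_contains,
                PySem.Dict.setdefault_of_not_contains, PySem.Dict.contains_insert,
                PySem.Dict.getD_insert, PySem.Dict.insert_insert_self])
    · by_cases h2 : b.contains 2 = true <;> by_cases h3 : b.contains 3 = true <;>
        by_cases h4 : b.contains 4 = true <;>
        simp [pvSpecR, m1, m2, h2, h3, h4, hg, pvSz, pvPush,
              pvP22, pvP22a, pvP22b, pvP22c,
              pvModify_eq_insert, PySem.Dict.setdefault_of_contains,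
              PySem.Dict.setdefault_of_not_contains, PySem.Dict.contains_insert,
              PySem.Dict.insert_insert_self]
  · simp [pvSpecR, m1, hg]

lemma pvChain (pp : List (Int × Int)) (run : PySem.Dict ((Int × Int) × (Int × Int)) Int)
    (p : Int × Int) (ds : List (Int × Int))
    (hds : ∀ d ∈ ds, (d.1 == 0 && d.2 == 0) = false ∧ run.getD (p, d) 0 = pvSpecR pp p d) :
    ∀ b : PySem.Dict Int (List (List (Int × Int))), pvGood b →
      ds.foldl (pvBodyA pp p) (b, pvSz b) =
        (ds.foldl (pvBodyB run p) b, pvSz (ds.foldl (pvBodyB run p) b)) ∧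
      pvGood (ds.foldl (pvBodyB run p) b) := by
  induction ds with
  | nil => intro b hb; exact ⟨rfl, hb⟩
  | cons d ds ih =>
    intro b hb
    have hd := pvStep_eq pp run p d b (hds d (by simp)).1 (hds d (by simp)).2 hb
    simp only [List.foldl_cons, hd.1]
    exact ih (fun d' hd' => hds d' (by simp [hd'])) _ hd.2

lemma pvDirs9_eq (pp : List (Int × Int)) (p : Int × Int)
    (st : PySem.Dict Int (List (List (Int × Int))) × List Int) :
    pvDirs9.foldl (pvBodyA pp p) st = pvDirs.foldl (pvBodyA pp p) st := by
  have hskip : ∀ st' : PySem.Dict Int (List (List (Int × Int))) × List Int,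
      pvBodyA pp p st' (0, 0) = st' := fun _ => rfl
  simp only [pvDirs9, pvDirs, List.foldl_cons, List.foldl_nil, hskip]

lemma pvOuter (pp : List (Int × Int)) (run : PySem.Dict ((Int × Int) × (Int × Int)) Int)
    (hr : ∀ p ∈ pp, ∀ d ∈ pvDirs, run.getD (p, d) 0 = pvSpecR pp p d)
    (l : List (Int × Int)) (hl : ∀ p ∈ l, p ∈ pp) :
    ∀ b : PySem.Dict Int (List (List (Int × Int))), pvGood b →
      l.foldl (fun st p => pvDirs9.foldl (pvBodyA pp p) st) (b, pvSz b) =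
        (l.foldl (fun bit p => pvDirs.foldl (pvBodyB run p) bit) b,
         pvSz (l.foldl (fun bit p => pvDirs.foldl (pvBodyB run p) bit) b)) ∧
      pvGood (l.foldl (fun bit p => pvDirs.foldl (pvBodyB run p) bit) b) := by
  induction l with
  | nil => intro b hb; exact ⟨rfl, hb⟩
  | cons p l ihl =>
    intro b hb
    have hds : ∀ d ∈ pvDirs, (d.1 == 0 && d.2 == 0) = false ∧
        run.getD (p, d) 0 = pvSpecR pp p d := by
      have hz : ∀ d ∈ pvDirs, (d.1 == 0 && d.2 == 0) = false := by decide
      intro d hd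
      exact ⟨hz d hd, hr p (hl p (by simp)) d hd⟩
    have hp := pvChain pp run p pvDirs hds b hb
    simp only [List.foldl_cons, pvDirs9_eq, hp.1]
    exact ihl (fun p' hp' => hl p' (by simp [hp'])) _ hp.2

-- ===== VERDICT (by name: the statement is the Claim_ definition above) =====
theorem getBit_spec : Claim_equal_getBit := by
  intro placePiece _
  unfold Spec_getBit
  rw [pvA_unfold]
  unfold getBit_alt
  cases placePiece with
  | nil => rfl
  | cons x xs =>
    have hr : ∀ p ∈ (x :: xs), ∀ d ∈ pvDirs,
        (pvDirs.foldl (pvDirFold (x :: xs) (PySem.Set.ofList (x :: xs)))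
          (PySem.Dict.empty : PySem.Dict ((Int × Int) × (Int × Int)) Int)).getD (p, d) 0
          = pvSpecR (x :: xs) p d := by
      intro p hp d hd
      have h := pvStage1_get (x :: xs) pvDirs PySem.Dict.empty (by decide)
        (by decide) d hd p hp
      exact PySem.Dict.getD_of_get?_eq_some _ 0 h
    have h0 : pvGood (PySem.Dict.empty : PySem.Dict Int (List (List (Int × Int)))) := rfl
    have h := (pvOuter (x :: xs) _ hr (x :: xs) (fun _ h => h) PySem.Dict.empty h0).1
    simp only [List.length_cons, List.isEmpty_cons]
    rw [show pvSz (PySem.Dict.empty : PySem.Dict Int (List (List (Int × Int)))) = [1,2,3,4] from rfl] at h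
    rw [h]
    simp
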